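/- GENERATED by tools/from_farm_form.py from prooffarm-gif/accepted/DGifGetExtensionNext.E/Proof.lean (a worked proof of the farm's unit `DGifGetExtensionNext.E`,
   accepted by the verdict) — do not edit. -/
import Gif.Spec.Units.DGifGetExtensionNext_E
import Gif.Spec.AllSegs

open X86 X86.User Asan ProgX.Base ProgX.Base.Spec Gif.Spec

set_option maxRecDepth 4000
set_option maxHeartbeats 4000000

/-!
  `DGifGetExtensionNext.E` (0x1098a6 … the `ret` at 0x1098c2, 10 instructions; dgif_lib.c:624): THE EPILOGUE OF A PROTECTED FUNCTION,
  after the worked unit `DGifGetWord.E` (farm.gif/worked/DGifGetWord.E; recipe: farm.gif/hints/protected_frame.md):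
    1. the prelude: the entry assertion `Done` as walker facts; the shadow index register `rbp` as a word VARIABLE `b` with bounds;
    2. the walk to the `ret` (the six pops and the return address are read through the shadow store by the walker itself);
    3. `stores1_index`: `hmem : s.mem = storesMem v.mem (base / 8) F.epilogue`;
    4. `after_epilogue` (`HeapInv` for the callers' frames, `GifOK`, `rem`), `epilogue_same` (`Returned.same`), `rd_storesMem`;
    5. `Returned`, field by field.
-/

/-- The epilogue of `DGifGetExtensionNext` takes `Done` at 0x1098a6 to `Returned`. -/
theorem Gif.Spec.Proved.DGifGetExtensionNext_E_ok : Gif.Spec.DGifGetExtensionNext_E.Statement := by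
  intro Lay hLay μ hμ u₀ hcode H rest frames F R e ret v hat
  -- 1. THE PRELUDE: the entry assertion `Done` = `Body` + the result in `r12`
  obtain ⟨hbody, hres, hok1⟩ := hat
  have he := hbody.entry
  v_entry he
  obtain ⟨henv, hrdi, hout⟩ := hbody.pre
  -- what the walker reads of a segment's entry state: rip, rsp (as `c_rsp`), the registers kept, the text, DF / MXCSR
  have w_rip := hbody.rip
  have c_rsp : v.reg .rsp = e.reg .rsp - 136 := hbody.rsp
  have w_kept : RegsKept [.rsp] v v := RegsKept.refl _ _
  have w_eq : Mem.EqOn ProgX.Base.L.textLo ProgX.Base.L.textHi u₀.mem v.mem := ProgX.Base.conv_code_eqOn hbody.code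
  have hdf := (show abiInv _ from hbody.abi).1
  have hmx := (show abiInv _ from hbody.abi).2
  have hsse := ProgX.Base.sseOK_of_abiInv hbody.abi
  -- the slots the six pops and the `ret` read
  have k_r15 : v.mem.readLE (e.reg .rsp - 8) 8 = (e.reg .r15).toNat := hbody.slot_r15
  have k_r14 : v.mem.readLE (e.reg .rsp - 16) 8 = (e.reg .r14).toNat := hbody.slot_r14
  have k_r13 : v.mem.readLE (e.reg .rsp - 24) 8 = (e.reg .r13).toNat := hbody.slot_r13
  have k_r12 : v.mem.readLE (e.reg .rsp - 32) 8 = (e.reg .r12).toNat := hbody.slot_r12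
  have k_rbp : v.mem.readLE (e.reg .rsp - 40) 8 = (e.reg .rbp).toNat := hbody.slot_rbp
  have k_rbx : v.mem.readLE (e.reg .rsp - 48) 8 = (e.reg .rbx).toNat := hbody.slot_rbx
  have k_ra : UInt64.ofNat (v.mem.readLE (e.reg .rsp) 8) = ret := hbody.slot_ra
  -- the result register `r12` as a variable `z` (the epilogue does `mov eax, r12d`)
  obtain ⟨z, c_r12⟩ : ∃ z, v.reg .r12 = z := ⟨_, rfl⟩
  rw [c_r12] at hres hok1
  -- THE SHADOW INDEX REGISTER AS A VARIABLE `b` WITH BOUNDS: no `>>> 3` is in the walk's context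
  have e120 : (e.reg .rsp - 120).toNat = (e.reg .rsp).toNat - 120 := by u_omega
  obtain ⟨b, hb⟩ : ∃ b : Word, b = (e.reg .rsp - 120) >>> 3 := ⟨_, rfl⟩
  have hbn : b.toNat = ((e.reg .rsp).toNat - 120) / 8 := by
    rw [hb, Asan.toNat_shr3, e120]
  have hb1 : 0xE0000 ≤ b.toNat := by omega
  have hb2 : b.toNat + 8 ≤ 0x100000 := by omega
  have c_rbp : v.reg .rbp = b := by
    rw [hb]
    exact hbody.rbp
  clear hb
  -- 2. THE WALK, to the `ret`: no side goal is left
  u_walk hcode [hμ.vendor] span [ProgX.Base.L.textLo, ProgX.Base.L.textHi] side (v_side)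
  -- 3. THE EPILOGUE'S STORE AS THE LAYOUT'S `storesMem`: the displacement as the walker prints it, granule offset, width, value
  have hepi : Gif.Frames.DGifGetExtensionNext.epilogue = [⟨0, 8, 0⟩] := rfl
  have hmem : s_1098c2.mem = storesMem v.mem (((e.reg .rsp).toNat - 120) / 8) Gif.Frames.DGifGetExtensionNext.epilogue := by
    rw [hepi, w_mem, ← hbn]
    exact stores1_index v.mem b 12582912 0 8 0 (by omega) (by decide) (by decide)
  have hin : ∀ s, s ∈ Gif.Frames.DGifGetExtensionNext.epilogue → s.idx + s.width ≤ 8 := by decide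
  clear w_mem
  -- 4. THE ENVIRONMENT behind the epilogue: the callers' frames, the clean stack ends above the return address
  obtain ⟨hinv2, hok2, hrem2⟩ := after_epilogue (top := (e.reg .rsp).toNat) (ro := 120) (Fl := Gif.Frames.DGifGetExtensionNext) rfl
    hbody.inv henv.ctx hbody.ok he_align he_top henv.heap.inv.frames_above
  -- the frame's shadow span leaves the footprint
  have hsame2 := epilogue_same (top := (e.reg .rsp).toNat) (ro := 120) (ro' := 56) (Fl := Gif.Frames.DGifGetExtensionNext) rfl rfl
    henv.heap.inv hbody.inv he_align hbody.same
  rw [← hmem] at hinv2 hok2 hrem2 hsame2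
  -- what the post reads over the shadow store: `*Extension` (a stack address) and `pv.Buf[0]` (inside pv)
  have hpv := henv.ok.pv_where henv.heap.inv.heap henv.heap.base
  have hlow := hout.low
  have hrd_ext : rd s_1098c2.mem (e.reg .rsi).toNat 8 = rd v.mem (e.reg .rsi).toNat 8 := by
    rw [hmem]
    exact rd_storesMem v.mem _ 8 _ hin (by omega) _ _ (by omega)
  have hrd_buf : rd s_1098c2.mem (F.pv + 88) 1 = rd v.mem (F.pv + 88) 1 := by
    rw [hmem]
    exact rd_storesMem v.mem _ 8 _ hin (by omega) _ _ (by omega)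
  -- the result register: `mov eax, r12d` with `r12` = 0 or 1
  have e_rax : (s_1098c2.reg .rax).toNat = z.toNat := by
    rw [w_rax]
    show (UInt64.ofBitVec ((Word.part .w32 z).setWidth 64)).toNat = z.toNat
    rw [UInt64.toNat_ofBitVec, BitVec.toNat_setWidth, ProgX.toNat_part32]
    omega
  -- 5. `Returned`, field by field
  refine ReachVia.done ?_
  refine X86.User.Returned.mk w_rip w_rsp ?saved ?same (ProgX.Base.conv_code_in w_eq) ?abi ?post
  case saved =>
    -- the six popped registers are the walker's facts
    intro r hr
    cases r <;> first
      | exact absurd hr (by decide)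
      | (with_reducible assumption)
  case same =>
    simp only [X86.User.Spec.footprint, vspec]
    exact hsame2
  case abi =>
    -- DF and MXCSR by hand (`v_inv` is slow behind a walk with shadow stores)
    refine ProgX.Base.abiInv_of ?_ ?_
    · rw [w_flags]
      simp only [X86.User.df_setStatus]
      exact hdf
    · rw [w_mxcsr]
      exact hmx
  case post =>
    -- `Back` (the environment, the reader did not go back), the result is a boolean, GIF_OK gives `BlockPost`
    refine ⟨⟨hinv2, hok2, ?_⟩, ?_, ?_⟩
    · rw [hrem2]
      exact hbody.rem
    · unfold IsBool
      rw [e_rax]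
      exact hres
    · rw [e_rax]
      intro h1
      have hbp := hok1 h1
      unfold BlockPost at hbp ⊢
      rw [hrd_ext, hrd_buf, hrem2]
      exact hbp
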